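-- pv_equiv track=rewrite | github.com/vinchinzu/euler | python/170.py | digit_info
-- ===== SOURCE A (Python) =====
-- from typing import List, Optional, Tuple
--
-- def digit_info(number: int) -> Optional[Tuple[int, int, str]]:
--     """Get digit mask, length, and string representation."""
--     if number <= 0:
--         return None
--     mask = 0
--     length = 0
--     n = number
--     while n > 0:
--         digit = n % 10
--         bit = 1 << digit
--         if (mask & bit) != 0:
--             return None
--         mask |= bit
--         n //= 10
--         length += 1
--     return (mask, length, str(number))
-- ===== SOURCE B (Python) =====
-- def digit_info(number):
--     """Get digit mask, length, and string representation."""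
--     if number <= 0:
--         return None
--     s = str(number)
--     if len(set(s)) != len(s):
--         return None
--     mask = sum(1 << int(c) for c in set(s))
--     return (mask, len(s), s)
-- ===== Notes on version B (the rewrite author's own statement) =====
-- stated objective: simpler
-- what changed: Replaces the arithmetic mod/floordiv digit-extraction loop with an in-loop bit test and early return by a two-phase string/set formulation: distinctness is decided once by len(set(s)) != len(s), and the mask is built in a separate pass summing 1 << int(c) over the distinct digits.
import Mathlib
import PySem

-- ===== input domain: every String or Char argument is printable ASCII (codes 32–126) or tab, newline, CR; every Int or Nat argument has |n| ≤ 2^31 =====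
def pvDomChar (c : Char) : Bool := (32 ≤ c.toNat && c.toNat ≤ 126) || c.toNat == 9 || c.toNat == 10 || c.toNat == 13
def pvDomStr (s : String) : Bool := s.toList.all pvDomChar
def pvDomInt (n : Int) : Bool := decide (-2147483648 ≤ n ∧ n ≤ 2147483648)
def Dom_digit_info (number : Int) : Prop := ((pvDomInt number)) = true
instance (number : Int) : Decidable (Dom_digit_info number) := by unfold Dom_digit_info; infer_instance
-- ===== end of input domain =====

-- B replaces A's arithmetic digit-extraction loop (in-loop bit test, early return) by a two-phase
-- string/set formulation: a distinctness check via len(set(s)) != len(s), then a separate mask-summing pass.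

-- ===== PORT A =====
-- termination fact for the while-loop: n //= 10 strictly decreases a positive n
theorem pvFloordivLt (n : Int) (h : 0 < n) : (PySem.Int.floordiv n 10).toNat < n.toNat := by
  have h1 : PySem.Int.floordiv n 10 < n := by
    rw [PySem.Int.floordiv_lt_iff_lt_mul (by omega)]; omega
  have h2 : 0 ≤ PySem.Int.floordiv n 10 := by
    rw [PySem.Int.le_floordiv_iff_mul_le (by omega)]; omega
  omega

def digitLoopA (n mask length : Int) : Option (Int × Int) :=
  if h : 0 < n then
    let digit := PySem.Int.mod n 10
    let bit : Int := 1 <<< digit.toNat   -- 1 << digit (digit = n % 10 is nonnegative)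
    if PySem.Int.band mask bit ≠ 0 then none
    else digitLoopA (PySem.Int.floordiv n 10) (PySem.Int.bor mask bit) (length + 1)
  else some (mask, length)
termination_by n.toNat
decreasing_by exact pvFloordivLt n h

def digit_info (number : Int) : Option (Int × Int × String) :=
  if number ≤ 0 then none
  else match digitLoopA number 0 0 with
    | none => none
    | some (mask, length) => some (mask, length, PySem.Int.toStr number)

-- ===== PORT B =====
def digit_info_alt (number : Int) : Option (Int × Int × String) :=
  if number ≤ 0 then none
  else
    let s := PySem.Int.toStr number
    if PySem.Set.len (PySem.Set.ofList s.toList) ≠ PySem.Str.len s then none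
    else
      -- int(c) for a decimal digit character c is c.toNat - 48 (exact here: s = str(number) holds only '0'-'9')
      let mask := (PySem.Set.ofList s.toList).foldl (fun acc c => acc + ((1 : Int) <<< ((c.toNat - 48 : Nat)))) 0
      some (mask, PySem.Str.len s, s)

-- ===== PRECONDITION & SPEC =====
def Spec_digit_info (number : Int) (out : Option (Int × Int × String)) : Prop := out = digit_info_alt number
instance (number : Int) (out : Option (Int × Int × String)) : Decidable (Spec_digit_info number out) := by unfold Spec_digit_info; infer_instance

-- ===== CLAIM (what is proved, stated in full; the proofs are below) =====
def Claim_equal_digit_info : Prop := ∀ (number : Int), Dom_digit_info number → Spec_digit_info number (digit_info number)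

-- ===== LEMMAS AND PROOFS =====

theorem pvOrModTwo (m n : Nat) : (m ||| n) % 2 = m % 2 ||| n % 2 := by
  rcases Nat.mod_two_eq_zero_or_one m with hm | hm <;>
  rcases Nat.mod_two_eq_zero_or_one n with hn | hn <;>
  rcases Nat.mod_two_eq_zero_or_one (m ||| n) with h | h <;>
  simp [hm, hn, h] <;>
  (exfalso; have := (@Nat.or_mod_two_eq_one m n); omega)

theorem pvAndModTwo (m n : Nat) : (m &&& n) % 2 = m % 2 &&& n % 2 := by
  rcases Nat.mod_two_eq_zero_or_one m with hm | hm <;>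
  rcases Nat.mod_two_eq_zero_or_one n with hn | hn <;>
  rcases Nat.mod_two_eq_zero_or_one (m &&& n) with h | h <;>
  simp [hm, hn, h] <;>
  (exfalso; have := (@Nat.and_mod_two_eq_one m n); omega)

theorem pvLorEqAdd : ∀ m n : Nat, m &&& n = 0 → m ||| n = m + n := by
  intro m
  induction m using Nat.strong_induction_on with
  | _ m ih =>
    intro n h
    rcases Nat.eq_zero_or_pos m with rfl | hm
    · simp
    · have hd : m / 2 &&& n / 2 = 0 := by rw [← Nat.and_div_two, h]
      have ihd := ih (m / 2) (Nat.div_lt_self hm (by omega)) (n / 2) hd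
      have h2 : m % 2 &&& n % 2 = 0 := by rw [← pvAndModTwo, h]
      have hmod : (m ||| n) % 2 = m % 2 + n % 2 := by
        rw [pvOrModTwo]
        rcases Nat.mod_two_eq_zero_or_one m with hm2 | hm2 <;>
        rcases Nat.mod_two_eq_zero_or_one n with hn2 | hn2 <;>
        simp_all
      have hdiv : (m ||| n) / 2 = m / 2 + n / 2 := by rw [Nat.or_div_two, ihd]
      omega

-- abstract version of A's loop over the low-to-high digit list, with a Nat mask
def loopD : List Nat → Nat → Int → Option (Int × Int)
  | [], M, len => some ((M : Int), len)
  | d :: ds, M, len =>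
    if M &&& (1 <<< d) ≠ 0 then none else loopD ds (M ||| (1 <<< d)) (len + 1)

theorem pvAndTwoPowEqZero (M d : Nat) : M &&& (1 <<< d) = 0 ↔ M.testBit d = false := by
  rw [Nat.shiftLeft_eq, one_mul, Nat.and_two_pow]
  cases M.testBit d <;> simp

theorem loopD_eq (ds : List Nat) : ∀ (M : Nat) (len : Int),
    loopD ds M len =
      if ds.Nodup ∧ ∀ d ∈ ds, M.testBit d = false
      then some (((M + (ds.map (2 ^ ·)).sum : Nat) : Int), len + ds.length) else none := by
  induction ds with
  | nil => intro M len; simp [loopD]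
  | cons d ds ih =>
    intro M len
    by_cases hb : M.testBit d
    · have : M &&& (1 <<< d) ≠ 0 := by
        rw [Ne, pvAndTwoPowEqZero, hb]; simp
      simp [loopD, this, hb]
    · have hz : M &&& (1 <<< d) = 0 := by rw [pvAndTwoPowEqZero]; simpa using hb
      have hM' : M ||| (1 <<< d) = M + 2 ^ d := by
        rw [pvLorEqAdd _ _ hz, Nat.shiftLeft_eq, one_mul]
      rw [loopD, if_neg (by simp [hz]), ih]
      by_cases hnd : ds.Nodup ∧ ∀ d' ∈ ds, (M ||| (1 <<< d)).testBit d' = false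
      · obtain ⟨hnd1, hnd2⟩ := hnd
        have hdn : d ∉ ds := by
          intro hmem
          have := hnd2 d hmem
          rw [Nat.testBit_or, Nat.shiftLeft_eq, one_mul, Nat.testBit_two_pow] at this
          simp at this
        have hall : ∀ d' ∈ d :: ds, M.testBit d' = false := by
          intro d' hd'
          rcases List.mem_cons.mp hd' with rfl | hd'
          · simpa using hb
          · have := hnd2 d' hd'
            rw [Nat.testBit_or] at this
            exact (Bool.or_eq_false_iff.mp this).1
        rw [if_pos ⟨hnd1, hnd2⟩, if_pos ⟨List.nodup_cons.mpr ⟨hdn, hnd1⟩, hall⟩]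
        simp [hM', List.sum_cons]
        constructor
        · ring
        · ring
      · rw [if_neg hnd, if_neg]
        rintro ⟨hnc, hac⟩
        obtain ⟨hdn, hnd1⟩ := List.nodup_cons.mp hnc
        refine hnd ⟨hnd1, fun d' hd' => ?_⟩
        rw [Nat.testBit_or, Nat.shiftLeft_eq, one_mul, Nat.testBit_two_pow]
        have h1 := hac d' (List.mem_cons_of_mem _ hd')
        have h2 : d ≠ d' := fun h => hdn (h ▸ hd')
        simp [h1, h2]

-- A's loop consumes exactly the digit list Nat.digits 10 n.toNat
theorem digitLoopA_eq (n : Int) (M : Nat) (len : Int) :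
    digitLoopA n (M : Int) len = loopD (Nat.digits 10 n.toNat) M len := by
  suffices H : ∀ k (n : Int) (M : Nat) (len : Int), n.toNat = k →
      digitLoopA n (M : Int) len = loopD (Nat.digits 10 n.toNat) M len from
    H n.toNat n M len rfl
  intro k
  induction k using Nat.strong_induction_on with
  | _ k ih =>
    intro n M len hk
    rw [digitLoopA]
    by_cases h : 0 < n
    · have hmod : PySem.Int.mod n 10 = ((n.toNat % 10 : Nat) : Int) := by
        simp [pysem]; omega
      have hdiv : PySem.Int.floordiv n 10 = ((n.toNat / 10 : Nat) : Int) := by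
        simp [pysem]; omega
      have hnt : 0 < n.toNat := by omega
      rw [dif_pos h, Nat.digits_def' (by norm_num) hnt]
      simp only [hmod, hdiv, Int.toNat_natCast, PySem.Int.band_natCast,
        PySem.Int.bor_natCast, loopD]
      by_cases hz : M &&& (1 <<< (n.toNat % 10)) = 0
      · rw [if_neg (by simpa using hz), if_neg (by simpa using hz)]
        rw [ih (n.toNat / 10) (by omega) _ _ _ (by omega), Int.toNat_natCast]
      · rw [if_pos (by simpa using hz), if_pos (by simpa using hz)]
    · have hz : n.toNat = 0 := by omega
      rw [dif_neg h, hz]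
      simp [loopD]

theorem pvOfListSublist {α : Type} [BEq α] [LawfulBEq α] (xs : List α) :
    (PySem.Set.ofList xs).Sublist xs := by
  induction xs using List.reverseRecOn with
  | nil => simp [PySem.Set.ofList]
  | append_singleton xs x ih =>
    rw [PySem.Set.ofList_append_singleton]
    by_cases h : x ∈ PySem.Set.ofList xs
    · rw [PySem.Set.add_of_mem h]
      exact ih.trans (List.sublist_append_left _ _)
    · rw [PySem.Set.add_of_not_mem h]
      exact ih.append (List.Sublist.refl _)

theorem pvOfListLenNodup {α : Type} [BEq α] [LawfulBEq α] (xs : List α)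
    (h : (PySem.Set.ofList xs).length = xs.length) : xs.Nodup := by
  have he := (pvOfListSublist xs).eq_of_length h
  rw [← he]
  exact PySem.Set.nodup_ofList xs

theorem pvDigitCharToNat (d : Nat) (h : d < 10) : (Nat.digitChar d).toNat = 48 + d := by
  interval_cases d <;> rfl

theorem pvToDigitsCore (f : Nat) : ∀ (n : Nat) (acc : List Char), 0 < n → n ≤ f →
    Nat.toDigitsCore 10 f n acc = ((Nat.digits 10 n).map Nat.digitChar).reverse ++ acc := by
  induction f with
  | zero => intro n acc h0 hf; omega
  | succ f ih =>
    intro n acc h0 hf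
    show (if n / 10 = 0 then (n % 10).digitChar :: acc
          else Nat.toDigitsCore 10 f (n / 10) ((n % 10).digitChar :: acc)) = _
    rw [Nat.digits_def' (by norm_num) h0]
    by_cases hz : n / 10 = 0
    · rw [if_pos hz, hz, Nat.digits_zero]
      simp
    · rw [if_neg hz, ih (n / 10) _ (by omega) (by omega : n / 10 ≤ f)]
      simp

theorem pvToChars (n : Int) (h : 0 < n) :
    (PySem.Int.toStr n).toList = ((Nat.digits 10 n.toNat).map Nat.digitChar).reverse := by
  rw [PySem.Int.toList_toStr]
  show (if n < 0 then '-' :: Nat.toDigits 10 n.natAbs else Nat.toDigits 10 n.toNat) = _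
  rw [if_neg (by omega)]
  show Nat.toDigitsCore 10 (n.toNat + 1) n.toNat [] = _
  rw [pvToDigitsCore _ _ _ (by omega) (by omega), List.append_nil]

-- ===== VERDICT (by name: the statement is the Claim_ definition above) =====
theorem digit_info_spec : Claim_equal_digit_info := by
  unfold Claim_equal_digit_info Spec_digit_info
  intro number _
  by_cases hle : number ≤ 0
  · simp [digit_info, digit_info_alt, hle]
  · have hpos : 0 < number := by omega
    have hm0 : 0 < number.toNat := by omega
    have hlt10 : ∀ d ∈ Nat.digits 10 number.toNat, d < 10 :=
      fun d hd => Nat.digits_lt_base (by norm_num) hd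
    have hcs := pvToChars number hpos
    rw [digit_info, digit_info_alt, if_neg hle, if_neg hle]
    have hA : digitLoopA number 0 0 = loopD (Nat.digits 10 number.toNat) 0 0 := by
      have h0 := digitLoopA_eq number 0 0
      simpa using h0
    rw [loopD_eq] at hA
    by_cases hnd : (Nat.digits 10 number.toNat).Nodup
    · -- all digits distinct: both return the (mask, length, string) triple
      have hcsnd : (((Nat.digits 10 number.toNat).map Nat.digitChar).reverse).Nodup := by
        rw [List.nodup_reverse]
        refine hnd.map_on (fun x hx y hy hxy => ?_)
        have h1 := pvDigitCharToNat x (hlt10 x hx)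
        have h2 := pvDigitCharToNat y (hlt10 y hy)
        have := congrArg Char.toNat hxy
        omega
      have hofl : PySem.Set.ofList (PySem.Int.toStr number).toList
          = (PySem.Int.toStr number).toList := by
        rw [hcs]
        exact PySem.Set.ofList_eq_self_of_nodup _ hcsnd
      rw [if_pos ⟨hnd, fun d _ => Nat.zero_testBit d⟩] at hA
      rw [hA, if_neg (by rw [hofl]; simp [PySem.Set.len, PySem.Str.len])]
      rw [hofl]
      have hmask : ((PySem.Int.toStr number).toList).foldl
          (fun acc c => acc + ((1 : Int) <<< ((c.toNat - 48 : Nat)))) 0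
          = (((Nat.digits 10 number.toNat).map (2 ^ ·)).sum : Nat) := by
        rw [PySem.List.foldl_add, hcs, List.map_reverse, List.sum_reverse_int, List.map_map]
        rw [Nat.cast_list_sum, List.map_map, zero_add]
        refine congrArg List.sum (List.map_congr_left fun d hd => ?_)
        simp only [Function.comp_apply]
        rw [pvDigitCharToNat d (hlt10 d hd), Nat.add_sub_cancel_left, Int.shiftLeft_eq]
        push_cast
        ring
      have hlen : PySem.Str.len (PySem.Int.toStr number)
          = ((Nat.digits 10 number.toNat).length : Int) := by
        show ((PySem.Int.toStr number).toList.length : Int) = _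
        rw [hcs]
        simp
      rw [hmask, hlen]
      simp
    · -- a repeated digit: both return none
      rw [if_neg (by rintro ⟨h1, _⟩; exact hnd h1)] at hA
      rw [hA, if_pos]
      intro hEq
      have hlen : (PySem.Set.ofList (PySem.Int.toStr number).toList).length
          = (PySem.Int.toStr number).toList.length := by
        have : ((PySem.Set.ofList (PySem.Int.toStr number).toList).length : Int)
            = ((PySem.Int.toStr number).toList.length : Int) := hEq
        exact_mod_cast this
      have := pvOfListLenNodup _ hlen
      rw [hcs, List.nodup_reverse] at this
      exact hnd (this.of_map _)
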